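-- pv_equiv track=rewrite | github.com/P1X3R/alpha-minus-one | decode_move.py | _parse_queen_style_move
-- ===== SOURCE A (Python) =====
-- QUEEN_MOVE_START = 0
--
-- QUEEN_MOVE_END = 55  # Represents 8 directions * 7 possible distances = 56 layers (0-55)
--
-- def _parse_queen_style_move(
--     move_layer: int, from_rank: int, from_file: int
-- ) -> tuple[int, int]:
--     """
--     Parses a 'queen-style' move layer (0-55) to determine the destination square.
--     These layers encode moves that are similar to how a queen, rook, or bishop moves
--     (i.e., straight or diagonal lines for a certain distance).
--
--     Args:
--         move_layer (int): The integer representing the specific queen-style move.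
--                           Ranges from 0 to 55.
--         from_rank (int): The 0-indexed rank (row) of the starting square.
--         from_file (int): The 0-indexed file (column) of the starting square.
--
--     Returns:
--         tuple[int, int]: A tuple containing the 0-indexed rank and file of the
--                          destination square (to_rank, to_file).
--
--     Raises:
--         ValueError: If the `move_layer` is outside the expected range for
--                     queen-style moves.
--     """
--     to_rank: int = from_rank
--     to_file: int = from_file
--     distance: int
--
--     # Define the 8 cardinal and intercardinal directions.
--     # Each tuple contains (start_layer_index, end_layer_index, rank_change, file_change).
--     directions = [
--         (0, 6, 1, 0),  # North (dr=1, df=0)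
--         (7, 13, 1, 1),  # North-East (dr=1, df=1)
--         (14, 20, 0, 1),  # East (dr=0, df=1)
--         (21, 27, -1, 1),  # South-East (dr=-1, df=1)
--         (28, 34, -1, 0),  # South (dr=-1, df=0)
--         (35, 41, -1, -1),  # South-West (dr=-1, df=-1)
--         (42, 48, 0, -1),  # West (dr=0, df=-1)
--         (49, 55, 1, -1),  # North-West (dr=1, df=-1)
--     ]
--
--     for start, end, direction_rank, direction_file in directions:
--         if QUEEN_MOVE_START <= move_layer <= QUEEN_MOVE_END:  # Ensure move_layer is within the valid range
--             if move_layer >= start and move_layer <= end: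
--                 # Calculate the distance from the starting square.
--                 # Each direction block (e.g., 0-6 for North) represents distances 1 through 7.
--                 distance = (move_layer - start) + 1
--                 to_rank = from_rank + distance * direction_rank
--                 to_file = from_file + distance * direction_file
--                 return to_rank, to_file
--
--     raise ValueError(f"Invalid move_layer for queen-style move: {move_layer}")
-- ===== SOURCE B (Python) =====
-- _QUEEN_DIRS = [(1, 0), (1, 1), (0, 1), (-1, 1), (-1, 0), (-1, -1), (0, -1), (1, -1)]
--
-- def _parse_queen_style_move(move_layer: int, from_rank: int, from_file: int) -> tuple[int, int]:
--     if not (0 <= move_layer <= 55):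
--         raise ValueError(f"Invalid move_layer for queen-style move: {move_layer}")
--     direction_index, offset = divmod(move_layer, 7)
--     distance = offset + 1
--     dr, df = _QUEEN_DIRS[direction_index]
--     return from_rank + distance * dr, from_file + distance * df
-- ===== Notes on version B (the rewrite author's own statement) =====
-- stated objective: simpler
-- what changed: Replaces the linear scan over 8 direction blocks with direct arithmetic: divmod(move_layer, 7) gives the direction index and distance, indexing a fixed (dr, df) table.
import Mathlib
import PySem

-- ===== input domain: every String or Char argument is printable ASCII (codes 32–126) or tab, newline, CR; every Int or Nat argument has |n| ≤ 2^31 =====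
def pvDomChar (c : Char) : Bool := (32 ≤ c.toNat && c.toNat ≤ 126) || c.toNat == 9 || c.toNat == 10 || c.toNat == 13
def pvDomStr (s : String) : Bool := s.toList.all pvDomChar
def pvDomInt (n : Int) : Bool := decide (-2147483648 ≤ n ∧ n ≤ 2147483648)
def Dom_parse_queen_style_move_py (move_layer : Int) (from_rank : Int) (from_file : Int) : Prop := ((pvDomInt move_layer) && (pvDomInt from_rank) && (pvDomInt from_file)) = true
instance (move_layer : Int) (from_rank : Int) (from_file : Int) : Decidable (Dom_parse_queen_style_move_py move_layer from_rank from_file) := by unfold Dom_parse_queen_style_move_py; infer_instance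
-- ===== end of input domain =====

-- B replaces A's linear scan over direction blocks with divmod arithmetic plus one table lookup (objective: simpler).
-- ===== PORT A =====
-- the directions table of A: (start, end, dr, df)
def pvDirectionsA : List (Int × Int × Int × Int) :=
  [(0, 6, 1, 0), (7, 13, 1, 1), (14, 20, 0, 1), (21, 27, -1, 1),
   (28, 34, -1, 0), (35, 41, -1, -1), (42, 48, 0, -1), (49, 55, 1, -1)]

-- A's for-loop with early return; none = the fall-through 'raise ValueError' (excluded by Pre_)
def pvScanA (move_layer from_rank from_file : Int) : List (Int × Int × Int × Int) → Option (Int × Int)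
  | [] => none
  | (start, stop, dr, df) :: rest =>
    if 0 ≤ move_layer ∧ move_layer ≤ 55 then
      if move_layer ≥ start ∧ move_layer ≤ stop then
        let distance := (move_layer - start) + 1
        some (from_rank + distance * dr, from_file + distance * df)
      else pvScanA move_layer from_rank from_file rest
    else pvScanA move_layer from_rank from_file rest

def parse_queen_style_move_py (move_layer : Int) (from_rank : Int) (from_file : Int) : Int × Int :=
  (pvScanA move_layer from_rank from_file pvDirectionsA).getD (0, 0)

-- ===== PORT B =====
def pvQueenDirs : List (Int × Int) :=
  [(1, 0), (1, 1), (0, 1), (-1, 1), (-1, 0), (-1, -1), (0, -1), (1, -1)]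

-- B's out-of-range branch raises ValueError (excluded by Pre_); (0, 0) stands for that raise
def parse_queen_style_move_py_alt (move_layer : Int) (from_rank : Int) (from_file : Int) : Int × Int :=
  if 0 ≤ move_layer ∧ move_layer ≤ 55 then
    let direction_index := PySem.Int.floordiv move_layer 7
    let offset := PySem.Int.mod move_layer 7
    let distance := offset + 1
    let p := (PySem.List.pyGet? pvQueenDirs direction_index).getD (0, 0)
    (from_rank + distance * p.1, from_file + distance * p.2)
  else (0, 0)

-- ===== PRECONDITION & SPEC =====
-- A raises ValueError (and B likewise) exactly when move_layer is outside 0..55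
def Pre_parse_queen_style_move_py (move_layer : Int) (from_rank : Int) (from_file : Int) : Prop :=
  0 ≤ move_layer ∧ move_layer ≤ 55
instance (move_layer : Int) (from_rank : Int) (from_file : Int) : Decidable (Pre_parse_queen_style_move_py move_layer from_rank from_file) := by unfold Pre_parse_queen_style_move_py; infer_instance

def pvWitness_parse_queen_style_move_py : Int × Int × Int := (17, 3, 4)

def Spec_parse_queen_style_move_py (move_layer : Int) (from_rank : Int) (from_file : Int) (out : Int × Int) : Prop := out = parse_queen_style_move_py_alt move_layer from_rank from_file
instance (move_layer : Int) (from_rank : Int) (from_file : Int) (out : Int × Int) : Decidable (Spec_parse_queen_style_move_py move_layer from_rank from_file out) := by unfold Spec_parse_queen_style_move_py; infer_instance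

-- ===== CLAIM (what is proved, stated in full; the proofs are below) =====
def Claim_equal_parse_queen_style_move_py : Prop := ∀ (move_layer : Int) (from_rank : Int) (from_file : Int), Dom_parse_queen_style_move_py move_layer from_rank from_file → Pre_parse_queen_style_move_py move_layer from_rank from_file → Spec_parse_queen_style_move_py move_layer from_rank from_file (parse_queen_style_move_py move_layer from_rank from_file)

-- ===== LEMMAS AND PROOFS =====

-- ===== VERDICT (by name: the statement is the Claim_ definition above) =====
theorem parse_queen_style_move_py_spec : Claim_equal_parse_queen_style_move_py := by
  intro move_layer from_rank from_file _ hpre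
  obtain ⟨h0, h55⟩ := hpre
  unfold Spec_parse_queen_style_move_py parse_queen_style_move_py parse_queen_style_move_py_alt
  interval_cases move_layer <;>
    simp [pvScanA, pvDirectionsA, pvQueenDirs, PySem.Int.floordiv, PySem.Int.mod,
          PySem.List.pyGet?, PySem.List.pyIdx?]
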